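-- pv_equiv track=rewrite | github.com/hutchinsp01/aoc2023 | src/13.py | find_smudge
-- ===== SOURCE A (Python) =====
-- def find_reflection(lake, prev):
--     for i in range(1, len(lake)):
--         if prev == i:
--             continue
--         left = lake[:i][::-1]
--         right = lake[i:]
--
--         if len(left) <= len(right):
--             if left == right[: len(left)]:
--                 return i
--         else:
--             if right == left[: len(right)]:
--                 return i
--
--     return None
--
-- def find_reflections(lake, prev_hor=None, prev_ver=None):
--     rotated_lake = list(zip(*lake[::-1]))
--
--     horizontal = find_reflection(lake, prev_hor)
--     vertical = find_reflection(rotated_lake, prev_ver)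
--
--     return horizontal, vertical
--
-- def find_smudge(lake, prev_hor, prev_ver):
--     for i in range(len(lake)):
--         for j in range(len(lake[i])):
--             lake[i][j] = "." if lake[i][j] == "#" else "#"
--
--             new_hor, new_ver = find_reflections(lake, prev_hor, prev_ver)
--
--             if new_hor or new_ver:
--                 return new_hor, new_ver
--
--             lake[i][j] = "." if lake[i][j] == "#" else "#"
--
--     return 0, 0
-- ===== SOURCE B (Python) =====
-- def _flip(c):
--     return "." if c == "#" else "#"
--
-- def _mismatches(g, a):
--     # number of mirrored row pairs around axis a that differ
--     return sum(1 for t in range(min(a, len(g) - a)) if g[a - 1 - t] != g[a + t])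
--
-- def _set(g, cnt, r, c, v):
--     # write g[r][c] = v and update each axis's mismatch count incrementally
--     old_row = g[r][:]
--     g[r][c] = v
--     for a in range(len(g)):
--         p = 2 * a - 1 - r  # row mirrored to r across axis a
--         if 0 <= p < len(g):
--             cnt[a] += (g[r] != g[p]) - (old_row != g[p])
--
-- def _axis(n, prev, cnt):
--     for i in range(1, n):
--         if i != prev and cnt[i] == 0:
--             return i
--     return None
--
-- def find_smudge(lake, prev_hor, prev_ver):
--     g = [list(row) for row in lake]
--     cols = [list(t) for t in zip(*g)]
--     hcnt = [_mismatches(g, a) for a in range(len(g))]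
--     vcnt = [_mismatches(cols, a) for a in range(len(cols))]
--     for i in range(len(g)):
--         for j in range(len(g[i])):
--             new = _flip(g[i][j])
--             _set(g, hcnt, i, j, new)
--             if j < len(cols):
--                 _set(cols, vcnt, j, i, new)
--             h = _axis(len(g), prev_hor, hcnt)
--             v = _axis(len(cols), prev_ver, vcnt)
--             if h or v:
--                 return h, v
--             back = _flip(g[i][j])
--             _set(g, hcnt, i, j, back)
--             if j < len(cols):
--                 _set(cols, vcnt, j, i, back)
--     return 0, 0
-- ===== Notes on version B (the rewrite author's own statement) =====
-- stated objective: faster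
-- what changed: B replaces A's per-candidate reflection search (rebuilding reversed slices and a rotated grid for every flipped cell) by one mismatch count per reflection axis, computed once up front and updated incrementally in O(R+C) per cell write, returning the first axis whose count is zero.
import Mathlib
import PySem

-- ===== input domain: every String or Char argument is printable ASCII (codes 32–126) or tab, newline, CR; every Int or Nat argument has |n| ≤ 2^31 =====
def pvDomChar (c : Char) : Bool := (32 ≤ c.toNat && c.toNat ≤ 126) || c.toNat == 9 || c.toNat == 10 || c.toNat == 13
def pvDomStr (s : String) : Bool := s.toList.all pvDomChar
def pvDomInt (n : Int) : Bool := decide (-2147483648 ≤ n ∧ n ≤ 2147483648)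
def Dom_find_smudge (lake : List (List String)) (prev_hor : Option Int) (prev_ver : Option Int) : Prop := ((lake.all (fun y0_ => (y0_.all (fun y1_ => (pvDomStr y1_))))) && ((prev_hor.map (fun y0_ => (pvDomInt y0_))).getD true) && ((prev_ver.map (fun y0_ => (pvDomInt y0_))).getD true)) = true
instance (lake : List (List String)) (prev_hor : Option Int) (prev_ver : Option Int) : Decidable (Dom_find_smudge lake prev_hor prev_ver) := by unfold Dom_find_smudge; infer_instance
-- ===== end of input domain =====

-- B replaces A's per-candidate slice/rotate reflection search by per-axis mismatch counts
-- updated incrementally on each cell write (objective: faster). A mutates `lake` in place,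
-- B works on a copy; the equivalence proved here is about the RETURN value only.

-- ===== PORT A =====
-- truthiness of `h or v` on values that are None or int (shared by both ports: Source B uses `if h or v` too)
def pvTruthy (o : Option Int) : Bool := match o with | none => false | some n => n != 0

-- `lake[i][j] = v` on a nested list (shared by both ports: Source B assigns `g[r][c] = v` the same way)
def pvSetCell (g : List (List String)) (i j : Nat) (v : String) : List (List String) :=
  g.set i ((g.getD i []).set j v)

-- `list(zip(*rows))`: zip of n lists truncates to the shortest; zip() of zero lists is empty (exact)
def pvZipStar (rows : List (List String)) : List (List String) :=
  (List.range (((rows.map List.length).min?).getD 0)).map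
    (fun j => rows.map (fun r => r.getD j ""))

-- `for i in range(1, len(lake)): …` body of find_reflection (lake[:i][::-1] is reverse∘take)
def findReflectionGo (lake : List (List String)) (prev : Option Int) : List Int → Option Int
  | [] => none
  | i :: rest =>
    if prev == some i then findReflectionGo lake prev rest
    else
      let left := (PySem.List.slice lake none (some i)).reverse
      let right := PySem.List.slice lake (some i) none
      if left.length ≤ right.length then
        if left == PySem.List.slice right none (some (left.length : Int)) then some i
        else findReflectionGo lake prev rest
      else
        if right == PySem.List.slice left none (some (right.length : Int)) then some i
        else findReflectionGo lake prev rest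

def find_reflection (lake : List (List String)) (prev : Option Int) : Option Int :=
  findReflectionGo lake prev (PySem.List.pyRange 1 (lake.length : Int) 1)

def find_reflections (lake : List (List String)) (prev_hor prev_ver : Option Int) : Option Int × Option Int :=
  let rotated := pvZipStar lake.reverse
  (find_reflection lake prev_hor, find_reflection rotated prev_ver)

-- inner `for j in range(len(lake[i]))` loop of find_smudge; fuel = number of remaining cells,
-- the mutated grid is threaded through; `.inl` = early return, `.inr` = loop finished
def aRowLoop (ph pv : Option Int) (i : Nat) :
    Nat → Nat → List (List String) → Sum (Option Int × Option Int) (List (List String))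
  | 0, _, g => .inr g
  | n+1, j, g =>
    let g1 := pvSetCell g i j (if (g.getD i []).getD j "" == "#" then "." else "#")
    let hv := find_reflections g1 ph pv
    if pvTruthy hv.1 || pvTruthy hv.2 then .inl hv
    else aRowLoop ph pv i n (j+1) (pvSetCell g1 i j (if (g1.getD i []).getD j "" == "#" then "." else "#"))

-- outer `for i in range(len(lake))` loop
def aRows (ph pv : Option Int) : Nat → Nat → List (List String) → Option Int × Option Int
  | 0, _, _ => (some 0, some 0)
  | n+1, i, g =>
    match aRowLoop ph pv i ((g.getD i []).length) 0 g with
    | .inl r => r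
    | .inr g' => aRows ph pv n (i+1) g'

def find_smudge (lake : List (List String)) (prev_hor : Option Int) (prev_ver : Option Int) : Option Int × Option Int :=
  aRows prev_hor prev_ver lake.length 0 lake

-- ===== PORT B =====
-- `_flip(c)`
def pvFlip (c : String) : String := if c == "#" then "." else "#"

-- `_mismatches(g, a)`: number of mirrored row pairs around axis a that differ
def hUneq (g : List (List String)) (a : Nat) : Int :=
  ((List.range (min a (g.length - a))).map
    (fun t => if g.getD (a-1-t) [] != g.getD (a+t) [] then (1:Int) else 0)).sum

-- the per-axis count adjustment of `_set`'s loop body: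
-- `p = 2*a-1-r; if 0 <= p < len(g): cnt[a] += (g[r] != g[p]) - (old_row != g[p])`
def pairDelta (g : List (List String)) (R r : Nat) (oldrow newrow : List String) (a : Nat) : Int :=
  let p : Int := 2*(a:Int) - 1 - (r:Int)
  if 0 ≤ p ∧ p < (R:Int) then
    (if newrow != g.getD p.toNat [] then (1:Int) else 0)
      - (if oldrow != g.getD p.toNat [] then (1:Int) else 0)
  else 0

-- `_set(g, cnt, r, c, v)`: write g[r][c] = v, returning the new grid and updated counts
def bSet (g : List (List String)) (cnt : List Int) (r c : Nat) (v : String) :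
    List (List String) × List Int :=
  let oldrow := g.getD r []
  let g1 := pvSetCell g r c v
  (g1, (List.range g.length).map (fun a => cnt.getD a 0 + pairDelta g1 g.length r oldrow (g1.getD r []) a))

-- `_axis(n, prev, cnt)`: first axis in 1..n-1 other than prev whose count is zero
def firstAxis (n : Nat) (prev : Option Int) (cnt : List Int) : Option Int :=
  ((List.range' 1 (n-1)).find?
    (fun i => (some ((i:Nat):Int) != prev) && (cnt.getD i 0 == 0))).map (fun i => ((i:Nat):Int))

-- inner `for j in range(len(g[i]))` loop of Source B, threading grid, transpose and both count tables
def bRowLoop (ph pv : Option Int) (i : Nat) :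
    Nat → Nat → List (List String) → List (List String) → List Int → List Int →
    Sum (Option Int × Option Int) (List (List String) × List (List String) × List Int × List Int)
  | 0, _, g, cols, hcnt, vcnt => .inr (g, cols, hcnt, vcnt)
  | n+1, j, g, cols, hcnt, vcnt =>
    let nw := pvFlip ((g.getD i []).getD j "")
    let s1 := bSet g hcnt i j nw
    let c1 := if j < cols.length then bSet cols vcnt j i nw else (cols, vcnt)
    let h := firstAxis s1.1.length ph s1.2
    let v := firstAxis c1.1.length pv c1.2
    if pvTruthy h || pvTruthy v then .inl (h, v)
    else
      let bk := pvFlip ((s1.1.getD i []).getD j "")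
      let s2 := bSet s1.1 s1.2 i j bk
      let c2 := if j < c1.1.length then bSet c1.1 c1.2 j i bk else c1
      bRowLoop ph pv i n (j+1) s2.1 c2.1 s2.2 c2.2

-- outer `for i in range(len(g))` loop of Source B
def bRows (ph pv : Option Int) :
    Nat → Nat → List (List String) → List (List String) → List Int → List Int →
    Option Int × Option Int
  | 0, _, _, _, _, _ => (some 0, some 0)
  | n+1, i, g, cols, hcnt, vcnt =>
    match bRowLoop ph pv i ((g.getD i []).length) 0 g cols hcnt vcnt with
    | .inl r => r
    | .inr (g', cols', h', v') => bRows ph pv n (i+1) g' cols' h' v'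

def find_smudge_alt (lake : List (List String)) (prev_hor : Option Int) (prev_ver : Option Int) : Option Int × Option Int :=
  -- `g = [list(row) for row in lake]` is an identity copy on immutable Lean lists;
  -- `cols = [list(t) for t in zip(*g)]` is the truncating transpose pvZipStar
  let cols := pvZipStar lake
  let hcnt := (List.range lake.length).map (fun a => hUneq lake a)
  let vcnt := (List.range cols.length).map (fun a => hUneq cols a)
  bRows prev_hor prev_ver lake.length 0 lake cols hcnt vcnt

-- ===== PRECONDITION & SPEC =====
def Spec_find_smudge (lake : List (List String)) (prev_hor : Option Int) (prev_ver : Option Int) (out : Option Int × Option Int) : Prop := out = find_smudge_alt lake prev_hor prev_ver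
instance (lake : List (List String)) (prev_hor : Option Int) (prev_ver : Option Int) (out : Option Int × Option Int) : Decidable (Spec_find_smudge lake prev_hor prev_ver out) := by unfold Spec_find_smudge; infer_instance

-- ===== CLAIM (what is proved, stated in full; the proofs are below) =====
def Claim_equal_find_smudge : Prop := ∀ (lake : List (List String)) (prev_hor : Option Int) (prev_ver : Option Int), Dom_find_smudge lake prev_hor prev_ver → Spec_find_smudge lake prev_hor prev_ver (find_smudge lake prev_hor prev_ver)

-- ===== LEMMAS AND PROOFS =====

-- generic single-point sum decomposition used for every incremental-count argument
lemma sum_range_update (k t0 : Nat) (f f' : Nat → Int) (ht : t0 < k)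
    (hag : ∀ t, t < k → t ≠ t0 → f' t = f t) :
    ((List.range k).map f').sum = ((List.range k).map f).sum + (f' t0 - f t0) := by
  induction k with
  | zero => omega
  | succ k ih =>
    rw [List.range_succ, List.map_append, List.map_append, List.sum_append, List.sum_append]
    by_cases h : t0 = k
    · subst h
      have he : (List.range t0).map f' = (List.range t0).map f := by
        apply List.map_congr_left; intro t htm
        have := List.mem_range.mp htm
        exact hag t (by omega) (by omega)
      rw [he]; simp
    · have ht0 : t0 < k := by omega
      rw [ih ht0 (fun t h1 h2 => hag t (by omega) h2)]
      have he : f' k = f k := hag k (by omega) (by omega)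
      simp [he]; ring

lemma min?_reverse_nat (l : List Nat) : l.reverse.min? = l.min? := by
  apply Option.ext; intro x
  rw [List.min?_eq_some_iff, List.min?_eq_some_iff]
  constructor
  · rintro ⟨h1, h2⟩; exact ⟨by simp at h1 ⊢; tauto, fun b hb => h2 b (by simp at hb ⊢; tauto)⟩
  · rintro ⟨h1, h2⟩; exact ⟨by simp at h1 ⊢; tauto, fun b hb => h2 b (by simp at hb ⊢; tauto)⟩

lemma sum_zero_mem (l : List Int) (hn : ∀ x ∈ l, 0 ≤ x) (hs : l.sum = 0) :
    ∀ x ∈ l, x = 0 := by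
  induction l with
  | nil => simp
  | cons a t ih =>
    simp only [List.sum_cons] at hs
    have hta : 0 ≤ a := hn a (by simp)
    have htt : 0 ≤ t.sum := List.sum_nonneg (fun x hx => hn x (by simp [hx]))
    intro x hx
    rcases List.mem_cons.mp hx with rfl | hx'
    · omega
    · exact ih (fun y hy => hn y (by simp [hy])) (by omega) x hx'

lemma getD_set_self' {α : Type} (l : List α) (i : Nat) (v d : α) (h : i < l.length) :
    (l.set i v).getD i d = v := by
  rw [List.getD_eq_getElem _ _ (by simpa using h)]
  exact List.getElem_set_self (by simpa using h)

lemma getD_set_ne' {α : Type} (l : List α) (i n : Nat) (v d : α) (h : n ≠ i) :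
    (l.set i v).getD n d = l.getD n d := by
  by_cases hn : n < l.length
  · rw [List.getD_eq_getElem _ _ (by simpa using hn), List.getD_eq_getElem _ _ hn]
    exact List.getElem_set_ne (Ne.symm h) (by simpa using hn)
  · rw [List.getD_eq_default _ _ (by simp; omega), List.getD_eq_default _ _ (by omega)]

lemma mapLength_set (g : List (List String)) (r : Nat) (x : List String)
    (hx : x.length = (g.getD r []).length) :
    (g.set r x).map List.length = g.map List.length := by
  by_cases hr : r < g.length
  · rw [List.map_set]
    have hxx : x.length = (g.map List.length).getD r 0 := by
      rw [hx, List.getD_eq_getElem _ _ hr, List.getD_eq_getElem _ _ (by simpa using hr)]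
      simp
    rw [hxx, List.getD_eq_getElem _ _ (by simpa using hr), List.set_getElem_self]
  · rw [List.set_eq_of_length_le (by omega)]

-- the axis count is zero exactly when every mirrored pair is equal
lemma hUneq_eq_zero_iff (g : List (List String)) (i : Nat) :
    hUneq g i = 0 ↔
      ∀ t, t < min i (g.length - i) → g.getD (i-1-t) [] = g.getD (i+t) [] := by
  unfold hUneq
  constructor
  · intro h t ht
    have hz := sum_zero_mem _ (fun x hx => by
      simp only [List.mem_map] at hx
      obtain ⟨t', _, rfl⟩ := hx
      split <;> simp) h
    have hmem : (if g.getD (i-1-t) [] != g.getD (i+t) [] then (1:Int) else 0) ∈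
        (List.range (min i (g.length - i))).map
          (fun t => if g.getD (i-1-t) [] != g.getD (i+t) [] then (1:Int) else 0) := by
      simp only [List.mem_map]
      exact ⟨t, List.mem_range.mpr ht, rfl⟩
    have hone := hz _ hmem
    by_contra hne
    rw [if_pos (bne_iff_ne.mpr hne)] at hone
    exact one_ne_zero hone
  · intro h
    have he : ∀ t ∈ List.range (min i (g.length - i)),
        (if g.getD (i-1-t) [] != g.getD (i+t) [] then (1:Int) else 0) = 0 := by
      intro t ht
      rw [h t (List.mem_range.mp ht)]
      simp
    rw [List.map_congr_left he]
    simp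

lemma axisA_iff_le (g : List (List String)) (x : Nat) (h2 : x < g.length)
    (hle : x ≤ g.length - x) :
    ((g.take x).reverse = (g.drop x).take x) ↔ hUneq g x = 0 := by
  rw [hUneq_eq_zero_iff, List.ext_getElem_iff]
  have hx : x ≤ g.length := by omega
  have hmin : min x (g.length - x) = x := by omega
  constructor
  · intro ⟨hl, h⟩ t htm
    rw [hmin] at htm
    have hb1 : x - 1 - t < g.length := by omega
    have hb2 : x + t < g.length := by omega
    have hL : t < ((g.take x).reverse).length := by simp; omega
    have hR : t < ((g.drop x).take x).length := by simp; omega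
    have hh := h t hL hR
    rw [List.getElem_reverse, List.getElem_take, List.getElem_take, List.getElem_drop] at hh
    simp only [List.length_take, Nat.min_eq_left hx] at hh
    rw [List.getD_eq_getElem _ _ hb1, List.getD_eq_getElem _ _ hb2]
    exact hh
  · intro h
    refine ⟨by simp; omega, ?_⟩
    intro t hL hR
    have ht : t < x := by simp at hL; omega
    have hb1 : x - 1 - t < g.length := by omega
    have hb2 : x + t < g.length := by omega
    have hh := h t (by omega)
    rw [List.getD_eq_getElem _ _ hb1, List.getD_eq_getElem _ _ hb2] at hh
    rw [List.getElem_reverse, List.getElem_take, List.getElem_take, List.getElem_drop]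
    simp only [List.length_take, Nat.min_eq_left hx]
    exact hh

lemma axisA_iff_gt (g : List (List String)) (x : Nat) (h2 : x < g.length)
    (hgt : g.length - x < x) :
    (g.drop x = (g.take x).reverse.take (g.length - x)) ↔ hUneq g x = 0 := by
  rw [hUneq_eq_zero_iff, List.ext_getElem_iff]
  have hx : x ≤ g.length := by omega
  have hmin : min x (g.length - x) = g.length - x := by omega
  constructor
  · intro ⟨hl, h⟩ t htm
    rw [hmin] at htm
    have hb1 : x - 1 - t < g.length := by omega
    have hb2 : x + t < g.length := by omega
    have hL : t < (g.drop x).length := by simp; omega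
    have hR : t < ((g.take x).reverse.take (g.length - x)).length := by simp; omega
    have hh := h t hL hR
    rw [List.getElem_drop, List.getElem_take, List.getElem_reverse, List.getElem_take] at hh
    simp only [List.length_take, Nat.min_eq_left hx] at hh
    rw [List.getD_eq_getElem _ _ hb1, List.getD_eq_getElem _ _ hb2]
    exact hh.symm
  · intro h
    refine ⟨by simp; omega, ?_⟩
    intro t hL hR
    have ht : t < g.length - x := by simp at hL; omega
    have hb1 : x - 1 - t < g.length := by omega
    have hb2 : x + t < g.length := by omega
    have hh := h t (by omega)
    rw [List.getD_eq_getElem _ _ hb1, List.getD_eq_getElem _ _ hb2] at hh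
    rw [List.getElem_drop, List.getElem_take, List.getElem_reverse, List.getElem_take]
    simp only [List.length_take, Nat.min_eq_left hx]
    exact hh.symm

-- A's find_reflection loop = find? of "axis mismatch count is zero" over the same indices
lemma go_eq (g : List (List String)) (prev : Option Int) (l : List Nat)
    (hmem : ∀ x ∈ l, 1 ≤ x ∧ x < g.length) :
    findReflectionGo g prev (l.map (fun k => ((k:Nat):Int))) =
      (l.find? (fun x => (some ((x:Nat):Int) != prev) &&
        (((List.range g.length).map (fun a => hUneq g a)).getD x 0 == 0))).map
          (fun x => ((x:Nat):Int)) := by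
  induction l with
  | nil => simp [findReflectionGo]
  | cons x rest ih =>
    have hx1 : 1 ≤ x := (hmem x (by simp)).1
    have hx2 : x < g.length := (hmem x (by simp)).2
    have ihr := ih (fun y hy => hmem y (by simp [hy]))
    have htbl : ((List.range g.length).map (fun a => hUneq g a)).getD x 0
        = hUneq g x := PySem.List.getD_map_range _ _ _ _ hx2
    simp only [List.map_cons, findReflectionGo]
    by_cases hp : prev == some ((x:Nat):Int)
    · have hpe : prev = some ((x:Nat):Int) := by simpa using hp
      rw [if_pos hp, List.find?_cons_of_neg (by simp [hpe]), ihr]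
    · have hne : (some ((x:Nat):Int) != prev) = true := by
        simp only [bne_iff_ne, ne_eq]
        intro h; exact hp (by simp [h.symm])
      rw [if_neg (by simpa using hp)]
      rw [PySem.List.slice_to_natCast, PySem.List.slice_from_natCast]
      have hlenL : ((g.take x).reverse).length = x := by simp; omega
      have hlenR : (g.drop x).length = g.length - x := by simp
      by_cases hc : x ≤ g.length - x
      · have hcc : ((g.take x).reverse).length ≤ (g.drop x).length := by omega
        rw [if_pos hcc, hlenL, PySem.List.slice_to_natCast]
        by_cases heq : hUneq g x = 0
        · have hax : (g.take x).reverse = (g.drop x).take x := (axisA_iff_le g x hx2 hc).mpr heq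
          rw [if_pos (by simpa using hax),
            List.find?_cons_of_pos (by simp only [htbl]; simp [hne, heq])]
          rfl
        · have hax : ¬((g.take x).reverse = (g.drop x).take x) :=
            fun h => heq ((axisA_iff_le g x hx2 hc).mp h)
          rw [if_neg (by simpa using hax),
            List.find?_cons_of_neg (by simp only [htbl]; simp [heq]), ihr]
      · have hcc : ¬(((g.take x).reverse).length ≤ (g.drop x).length) := by omega
        rw [if_neg hcc, hlenR, PySem.List.slice_to_natCast]
        by_cases heq : hUneq g x = 0
        · have hax : g.drop x = (g.take x).reverse.take (g.length - x) :=
            (axisA_iff_gt g x hx2 (by omega)).mpr heq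
          rw [if_pos (by simpa using hax),
            List.find?_cons_of_pos (by simp only [htbl]; simp [hne, heq])]
          rfl
        · have hax : ¬(g.drop x = (g.take x).reverse.take (g.length - x)) :=
            fun h => heq ((axisA_iff_gt g x hx2 (by omega)).mp h)
          rw [if_neg (by simpa using hax),
            List.find?_cons_of_neg (by simp only [htbl]; simp [heq]), ihr]

lemma reflH (g : List (List String)) (prev : Option Int) :
    find_reflection g prev
      = firstAxis g.length prev ((List.range g.length).map (fun a => hUneq g a)) := by
  unfold find_reflection firstAxis
  have h1 : PySem.List.pyRange 1 ((g.length : Nat) : Int) 1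
      = ((List.range (g.length - 1)).map (1 + ·)).map (fun k => ((k:Nat):Int)) := by
    rw [PySem.List.pyRange_one]
    have : (((g.length : Nat):Int) - 1).toNat = g.length - 1 := by omega
    rw [this, List.map_map]
    apply List.map_congr_left
    intro k _
    simp
  rw [h1, List.range'_eq_map_range]
  apply go_eq
  intro x hx
  simp only [List.mem_map, List.mem_range] at hx
  obtain ⟨k, hk, rfl⟩ := hx
  omega

lemma length_zipStar (rows : List (List String)) :
    (pvZipStar rows).length = ((rows.map List.length).min?).getD 0 := by
  unfold pvZipStar
  simp

lemma getD_zipStar (rows : List (List String)) (p : Nat)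
    (hp : p < ((rows.map List.length).min?).getD 0) :
    (pvZipStar rows).getD p [] = rows.map (fun r => r.getD p "") := by
  unfold pvZipStar
  exact PySem.List.getD_map_range _ _ _ _ hp

lemma minlen_reverse (g : List (List String)) :
    ((g.reverse.map List.length).min?).getD 0 = ((g.map List.length).min?).getD 0 := by
  rw [show g.reverse.map List.length = (g.map List.length).reverse from List.map_reverse,
    min?_reverse_nat]

-- a row of the rotated grid is the reversed column of the transposed grid
lemma hUneq_rot (g : List (List String)) (j : Nat) :
    hUneq (pvZipStar g.reverse) j = hUneq (pvZipStar g) j := by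
  unfold hUneq
  rw [length_zipStar, length_zipStar, minlen_reverse]
  apply congrArg
  apply List.map_congr_left
  intro t htm
  have ht := List.mem_range.mp htm
  set W := ((g.map List.length).min?).getD 0 with hW
  have h1 : j - 1 - t < W := by omega
  have h2 : j + t < W := by omega
  have e1 : ∀ p, p < W → (pvZipStar g.reverse).getD p [] = (g.map (fun r => r.getD p "")).reverse := by
    intro p hp
    rw [getD_zipStar g.reverse p (by rw [minlen_reverse]; exact hp)]
    exact List.map_reverse
  have e2 : ∀ p, p < W → (pvZipStar g).getD p [] = g.map (fun r => r.getD p "") :=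
    fun p hp => getD_zipStar g p hp
  rw [e1 _ h1, e1 _ h2, e2 _ h1, e2 _ h2]
  simp

lemma reflV (g : List (List String)) (prev : Option Int) :
    find_reflection (pvZipStar g.reverse) prev
      = firstAxis (pvZipStar g).length prev
          ((List.range (pvZipStar g).length).map
            (fun a => hUneq (pvZipStar g) a)) := by
  rw [reflH, length_zipStar, minlen_reverse, length_zipStar]
  apply congrArg (firstAxis _ prev)
  apply List.map_congr_left
  intro j _
  exact hUneq_rot g j

-- single-row change of an axis count: exactly pairDelta
lemma hUneq_set (g : List (List String)) (r : Nat) (x : List String) (hr : r < g.length) (a : Nat) :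
    hUneq (g.set r x) a = hUneq g a + pairDelta g g.length r (g.getD r []) x a := by
  unfold hUneq
  simp only [pairDelta]
  rw [List.length_set]
  by_cases hcase : 0 ≤ 2*(a:Int) - 1 - (r:Int) ∧ 2*(a:Int) - 1 - (r:Int) < (g.length:Int)
  · have htn : (2*(a:Int) - 1 - (r:Int)).toNat = 2*a - 1 - r := by omega
    set r2 : Nat := 2*a - 1 - r with hr2
    have hrne : r2 ≠ r := by omega
    have ha1 : 1 ≤ a := by omega
    have haR : a < g.length := by omega
    have ht0 : ∃ t0, t0 < min a (g.length - a) ∧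
        ((r < a ∧ a-1-t0 = r ∧ a+t0 = r2) ∨ (a ≤ r ∧ a-1-t0 = r2 ∧ a+t0 = r)) := by
      by_cases hra : r < a
      · exact ⟨a-1-r, by omega, Or.inl ⟨hra, by omega, by omega⟩⟩
      · exact ⟨r-a, by omega, Or.inr ⟨by omega, by omega, by omega⟩⟩
    obtain ⟨t0, ht0k, ht0s⟩ := ht0
    have hoff : ∀ t, t < min a (g.length - a) → t ≠ t0 →
        (fun t => if (g.set r x).getD (a-1-t) [] != (g.set r x).getD (a+t) [] then (1:Int) else 0) t
          = (fun t => if g.getD (a-1-t) [] != g.getD (a+t) [] then (1:Int) else 0) t := by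
      intro t ht htne
      dsimp only
      have hne1 : a-1-t ≠ r := by rcases ht0s with ⟨h1,h2,h3⟩|⟨h1,h2,h3⟩ <;> omega
      have hne2 : a+t ≠ r := by rcases ht0s with ⟨h1,h2,h3⟩|⟨h1,h2,h3⟩ <;> omega
      rw [getD_set_ne' _ _ _ _ _ hne1, getD_set_ne' _ _ _ _ _ hne2]
    rw [sum_range_update (min a (g.length - a)) t0 _ _ ht0k hoff]
    have hterm : (if (g.set r x).getD (a-1-t0) [] != (g.set r x).getD (a+t0) [] then (1:Int) else 0)
          - (if g.getD (a-1-t0) [] != g.getD (a+t0) [] then (1:Int) else 0)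
        = (if x != g.getD r2 [] then (1:Int) else 0)
            - (if g.getD r [] != g.getD r2 [] then (1:Int) else 0) := by
      rcases ht0s with ⟨h1,h2,h3⟩|⟨h1,h2,h3⟩
      · rw [h2, h3, getD_set_self' _ _ _ _ hr, getD_set_ne' _ _ _ _ _ hrne]
      · rw [h2, h3, getD_set_self' _ _ _ _ hr, getD_set_ne' _ _ _ _ _ hrne,
          bne_comm, @bne_comm (List String) _ _ (g.getD r2 []) (g.getD r [])]
    rw [hterm, htn, if_pos hcase]
  · rw [if_neg hcase]
    have he : ∀ t ∈ List.range (min a (g.length - a)),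
        (if (g.set r x).getD (a-1-t) [] != (g.set r x).getD (a+t) [] then (1:Int) else 0)
          = (if g.getD (a-1-t) [] != g.getD (a+t) [] then (1:Int) else 0) := by
      intro t htm
      have ht := List.mem_range.mp htm
      have hk1 : 1 ≤ a := by omega
      have hkR : a < g.length := by omega
      have hne1 : a-1-t ≠ r := by
        intro hcon
        apply hcase
        constructor <;> omega
      have hne2 : a+t ≠ r := by
        intro hcon
        apply hcase
        constructor <;> omega
      rw [getD_set_ne' _ _ _ _ _ hne1, getD_set_ne' _ _ _ _ _ hne2]
    rw [List.map_congr_left he]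
    ring

-- pairDelta only reads rows other than r, so it may read them from the updated grid
lemma pairDelta_set_self (g : List (List String)) (R r : Nat) (x orow nrow : List String) (a : Nat) :
    pairDelta (g.set r x) R r orow nrow a = pairDelta g R r orow nrow a := by
  simp only [pairDelta]
  by_cases hcase : 0 ≤ 2*(a:Int) - 1 - (r:Int) ∧ 2*(a:Int) - 1 - (r:Int) < (R:Int)
  · have hne : (2*(a:Int) - 1 - (r:Int)).toNat ≠ r := by omega
    rw [if_pos hcase, if_pos hcase, getD_set_ne' _ _ _ _ _ hne]
  · rw [if_neg hcase, if_neg hcase]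

-- `_set`'s count-update loop recomputes exactly the axis-count table of the updated grid
lemma tab_step (g : List (List String)) (r : Nat) (x : List String) (hr : r < g.length) :
    (List.range g.length).map (fun a =>
        ((List.range g.length).map (fun a => hUneq g a)).getD a 0
          + pairDelta (g.set r x) g.length r (g.getD r []) x a)
      = (List.range (g.set r x).length).map (fun a => hUneq (g.set r x) a) := by
  rw [List.length_set]
  apply List.map_congr_left
  intro a ham
  have ha := List.mem_range.mp ham
  rw [PySem.List.getD_map_range _ _ _ _ ha, pairDelta_set_self, hUneq_set g r x hr a]

-- `_set` on an axis-count table yields the updated grid with its axis-count table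
lemma bSet_spec (g : List (List String)) (r c : Nat) (v : String) (hr : r < g.length) :
    bSet g ((List.range g.length).map (fun a => hUneq g a)) r c v
      = (pvSetCell g r c v,
         (List.range (pvSetCell g r c v).length).map (fun a => hUneq (pvSetCell g r c v) a)) := by
  simp only [bSet, pvSetCell]
  rw [getD_set_self' _ _ _ _ hr]
  rw [tab_step g r _ hr]

-- updating one cell updates exactly one column of the transpose (or none, past the width)
lemma zipStar_set_lt (g : List (List String)) (r j : Nat) (v : String)
    (hr : r < g.length) (hj : j < (g.getD r []).length)
    (hjW : j < ((g.map List.length).min?).getD 0) :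
    pvZipStar (g.set r ((g.getD r []).set j v))
      = (pvZipStar g).set j (((pvZipStar g).getD j []).set r v) := by
  have hml : (g.set r ((g.getD r []).set j v)).map List.length = g.map List.length :=
    mapLength_set _ _ _ (by simp)
  unfold pvZipStar
  rw [hml]
  apply List.ext_getElem (by simp)
  intro c hc1 hc2
  have hcW : c < ((g.map List.length).min?).getD 0 := by simpa using hc1
  rw [List.getElem_map, List.getElem_range]
  by_cases hcj : c = j
  · subst hcj
    rw [List.getElem_set_self (by simpa using hcW), List.map_set]
    have hval : ((g.getD r []).set c v).getD c "" = v := getD_set_self' _ _ _ _ hj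
    rw [hval]
    have hcol : ((List.range (((g.map List.length).min?).getD 0)).map
        (fun j => g.map (fun r => r.getD j ""))).getD c []
        = g.map (fun r => r.getD c "") := PySem.List.getD_map_range _ _ _ _ hcW
    rw [hcol]
  · rw [List.getElem_set_ne (fun hcon => hcj hcon.symm) (by simpa using hcW),
      List.getElem_map, List.getElem_range, List.map_set]
    have hval : ((g.getD r []).set j v).getD c "" = (g.getD r []).getD c "" :=
      getD_set_ne' _ _ _ _ _ hcj
    rw [hval]
    have hvv : (g.getD r []).getD c "" = (g.map (fun r => r.getD c ""))[r]'(by simpa using hr) := by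
      rw [List.getD_eq_getElem _ _ hr]
      simp
    rw [hvv, List.set_getElem_self]

lemma zipStar_set_ge (g : List (List String)) (r j : Nat) (v : String)
    (hr : r < g.length) (hjW : ¬ j < ((g.map List.length).min?).getD 0) :
    pvZipStar (g.set r ((g.getD r []).set j v)) = pvZipStar g := by
  have hml : (g.set r ((g.getD r []).set j v)).map List.length = g.map List.length :=
    mapLength_set _ _ _ (by simp)
  unfold pvZipStar
  rw [hml]
  apply List.ext_getElem (by simp)
  intro c hc1 hc2
  have hcW : c < ((g.map List.length).min?).getD 0 := by simpa using hc1
  rw [List.getElem_map, List.getElem_range, List.getElem_map, List.getElem_range, List.map_set]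
  have hval : ((g.getD r []).set j v).getD c "" = (g.getD r []).getD c "" :=
    getD_set_ne' _ _ _ _ _ (by omega)
  rw [hval]
  have hvv : (g.getD r []).getD c "" = (g.map (fun r => r.getD c ""))[r]'(by simpa using hr) := by
    rw [List.getD_eq_getElem _ _ hr]
    simp
  rw [hvv, List.set_getElem_self]

lemma rowLoop_eq (ph pv : Option Int) (i : Nat) :
    ∀ (n j : Nat) (g : List (List String)),
      i < g.length → j + n = (g.getD i []).length →
      (bRowLoop ph pv i n j g (pvZipStar g)
          ((List.range g.length).map (fun a => hUneq g a))
          ((List.range (pvZipStar g).length).map (fun a => hUneq (pvZipStar g) a))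
        = (match aRowLoop ph pv i n j g with
           | .inl r => .inl r
           | .inr g' => .inr (g', pvZipStar g',
               (List.range g'.length).map (fun a => hUneq g' a),
               (List.range (pvZipStar g').length).map (fun a => hUneq (pvZipStar g') a)))
        ∧ (∀ g', aRowLoop ph pv i n j g = .inr g' → g'.map List.length = g.map List.length)) := by
  intro n
  induction n with
  | zero =>
    intro j g hiR h4
    constructor
    · simp [aRowLoop, bRowLoop]
    · intro g' hg'
      simp [aRowLoop] at hg'
      rw [hg']
  | succ n ih =>
    intro j g hiR h4
    have hj : j < (g.getD i []).length := by omega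
    simp only [aRowLoop, bRowLoop]
    rw [show pvFlip ((g.getD i []).getD j "")
        = (if (g.getD i []).getD j "" == "#" then "." else "#") from rfl]
    set nw := if (g.getD i []).getD j "" == "#" then ("." : String) else "#" with hnw
    rw [bSet_spec g i j nw hiR]
    set g1 := pvSetCell g i j nw with hg1
    have hml1 : g1.map List.length = g.map List.length := by
      rw [hg1]; unfold pvSetCell; exact mapLength_set _ _ _ (by simp)
    have hlen1 : g1.length = g.length := by
      have := congrArg List.length hml1; simpa using this
    have hrow1 : g1.getD i [] = (g.getD i []).set j nw := by
      rw [hg1]; unfold pvSetCell; exact getD_set_self' _ _ _ _ hiR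
    have hrowlen1 : (g1.getD i []).length = (g.getD i []).length := by rw [hrow1]; simp
    have hminW : ((g1.map List.length).min?).getD 0 = ((g.map List.length).min?).getD 0 := by
      rw [hml1]
    have hczlen : (pvZipStar g1).length = (pvZipStar g).length := by
      rw [length_zipStar, length_zipStar, hminW]
    have hiR1 : i < g1.length := by omega
    have hj1 : j < (g1.getD i []).length := by omega
    have hAside : find_reflections g1 ph pv
        = (find_reflection g1 ph, find_reflection (pvZipStar g1.reverse) pv) := rfl
    rw [hAside]
    by_cases hjW : j < (pvZipStar g).length
    · -- the flipped cell lies inside the transposed width: one column is updated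
      have hjW' : j < ((g.map List.length).min?).getD 0 := by
        rwa [length_zipStar] at hjW
      rw [if_pos hjW, bSet_spec (pvZipStar g) j i nw hjW]
      have hcz : pvSetCell (pvZipStar g) j i nw = pvZipStar g1 := by
        rw [hg1]; unfold pvSetCell; exact (zipStar_set_lt g i j nw hiR hj hjW').symm
      rw [hcz]
      dsimp only
      rw [← reflH g1 ph, ← reflV g1 pv]
      by_cases hcond : (pvTruthy (find_reflection g1 ph)
          || pvTruthy (find_reflection (pvZipStar g1.reverse) pv)) = true
      · simp only [hcond, if_true]
        exact ⟨by first | rfl | trivial, fun g' hg' => by simp at hg'⟩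
      · have hcond' : (pvTruthy (find_reflection g1 ph)
            || pvTruthy (find_reflection (pvZipStar g1.reverse) pv)) = false := by
          simpa using hcond
        simp only [hcond', Bool.false_eq_true, if_false]
        rw [show pvFlip ((g1.getD i []).getD j "")
            = (if (g1.getD i []).getD j "" == "#" then "." else "#") from rfl]
        set bk := if (g1.getD i []).getD j "" == "#" then ("." : String) else "#" with hbk
        rw [bSet_spec g1 i j bk hiR1]
        set g2 := pvSetCell g1 i j bk with hg2
        have hml2 : g2.map List.length = g.map List.length := by
          rw [hg2]; unfold pvSetCell
          rw [mapLength_set _ _ _ (by simp)]; exact hml1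
        have hlen2 : g2.length = g.length := by
          have := congrArg List.length hml2; simpa using this
        have hrow2 : g2.getD i [] = (g1.getD i []).set j bk := by
          rw [hg2]; unfold pvSetCell; exact getD_set_self' _ _ _ _ hiR1
        have hrowlen2 : (g2.getD i []).length = (g.getD i []).length := by
          rw [hrow2, List.length_set]; exact hrowlen1
        have hjW1 : j < ((g1.map List.length).min?).getD 0 := by rw [hminW]; exact hjW'
        rw [if_pos (show j < (pvZipStar g1).length from by rw [hczlen]; exact hjW),
          bSet_spec (pvZipStar g1) j i bk (by rw [hczlen]; exact hjW)]
        have hcz2 : pvSetCell (pvZipStar g1) j i bk = pvZipStar g2 := by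
          rw [hg2]; unfold pvSetCell; exact (zipStar_set_lt g1 i j bk hiR1 hj1 hjW1).symm
        rw [hcz2]
        dsimp only
        have hrec := ih (j+1) g2 (by omega) (by omega)
        exact ⟨hrec.1, fun g' hg' => by rw [hrec.2 g' hg', hml2]⟩
    · -- the flipped cell lies right of the shortest row: the transpose is unchanged
      have hjW' : ¬ j < ((g.map List.length).min?).getD 0 := by
        rwa [length_zipStar] at hjW
      rw [if_neg hjW]
      have hcz : pvZipStar g1 = pvZipStar g := by
        rw [hg1]; unfold pvSetCell; exact zipStar_set_ge g i j nw hiR hjW'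
      rw [← hcz]
      dsimp only
      rw [← reflH g1 ph, ← reflV g1 pv]
      by_cases hcond : (pvTruthy (find_reflection g1 ph)
          || pvTruthy (find_reflection (pvZipStar g1.reverse) pv)) = true
      · simp only [hcond, if_true]
        exact ⟨by first | rfl | trivial, fun g' hg' => by simp at hg'⟩
      · have hcond' : (pvTruthy (find_reflection g1 ph)
            || pvTruthy (find_reflection (pvZipStar g1.reverse) pv)) = false := by
          simpa using hcond
        simp only [hcond', Bool.false_eq_true, if_false]
        rw [show pvFlip ((g1.getD i []).getD j "")
            = (if (g1.getD i []).getD j "" == "#" then "." else "#") from rfl]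
        set bk := if (g1.getD i []).getD j "" == "#" then ("." : String) else "#" with hbk
        rw [bSet_spec g1 i j bk hiR1]
        set g2 := pvSetCell g1 i j bk with hg2
        have hml2 : g2.map List.length = g.map List.length := by
          rw [hg2]; unfold pvSetCell
          rw [mapLength_set _ _ _ (by simp)]; exact hml1
        have hlen2 : g2.length = g.length := by
          have := congrArg List.length hml2; simpa using this
        have hrow2 : g2.getD i [] = (g1.getD i []).set j bk := by
          rw [hg2]; unfold pvSetCell; exact getD_set_self' _ _ _ _ hiR1
        have hrowlen2 : (g2.getD i []).length = (g.getD i []).length := by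
          rw [hrow2, List.length_set]; exact hrowlen1
        have hjW1 : ¬ j < ((g1.map List.length).min?).getD 0 := by rw [hminW]; exact hjW'
        rw [if_neg (show ¬ j < (pvZipStar g1).length from by rw [hczlen]; exact hjW)]
        have hcz2 : pvZipStar g2 = pvZipStar g1 := by
          rw [hg2]; unfold pvSetCell; exact zipStar_set_ge g1 i j bk hiR1 hjW1
        rw [← hcz2]
        dsimp only
        have hrec := ih (j+1) g2 (by omega) (by omega)
        exact ⟨hrec.1, fun g' hg' => by rw [hrec.2 g' hg', hml2]⟩

lemma rows_eq (ph pv : Option Int) :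
    ∀ (n i : Nat) (g : List (List String)), i + n = g.length →
      bRows ph pv n i g (pvZipStar g)
          ((List.range g.length).map (fun a => hUneq g a))
          ((List.range (pvZipStar g).length).map (fun a => hUneq (pvZipStar g) a))
        = aRows ph pv n i g := by
  intro n
  induction n with
  | zero => intro i g h3; simp [aRows, bRows]
  | succ n ih =>
    intro i g h3
    simp only [aRows, bRows]
    have hrl := rowLoop_eq ph pv i ((g.getD i []).length) 0 g (by omega) (by omega)
    rw [hrl.1]
    cases hA : aRowLoop ph pv i ((g.getD i []).length) 0 g with
    | inl r => rfl
    | inr g' =>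
      have hml := hrl.2 g' hA
      have hlen' : g'.length = g.length := by
        have := congrArg List.length hml
        simpa using this
      exact ih (i+1) g' (by omega)

-- ===== VERDICT (by name: the statement is the Claim_ definition above) =====
theorem find_smudge_spec : Claim_equal_find_smudge := by
  intro lake prev_hor prev_ver _
  unfold Spec_find_smudge find_smudge find_smudge_alt
  exact (rows_eq prev_hor prev_ver lake.length 0 lake (by omega)).symm
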